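-- pv_equiv track=rewrite | github.com/Tran-Nhat-Duy1206/bot_discord | discord-bot/features/tft.py | fetch_required_value
-- ===== SOURCE A (Python) =====
-- def fetch_required_value(cond):
--     for k, v in cond.items():
--         if isinstance(v, int) and v not in (0, 1) and k.startswith("{"):
--             return v
--     for k, v in cond.items():
--         if isinstance(v, int) and k.startswith("{"):
--             return v
--     return 1
-- ===== SOURCE B (Python) =====
-- def fetch_required_value(cond):
--     fallback = None
--     for k, v in cond.items():
--         if isinstance(v, int) and k.startswith("{"):
--             if v not in (0, 1):
--                 return v
--             if fallback is None:
--                 fallback = v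
--     return fallback if fallback is not None else 1
-- ===== Notes on version B (the rewrite author's own statement) =====
-- stated objective: alternative
-- what changed: Replaces A's two full scans of cond.items() with a single pass that returns strict matches (int value outside {0,1} under a '{'-key) immediately and records the first loose match in a fallback variable, returning it (or 1) after the loop.
import Mathlib
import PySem

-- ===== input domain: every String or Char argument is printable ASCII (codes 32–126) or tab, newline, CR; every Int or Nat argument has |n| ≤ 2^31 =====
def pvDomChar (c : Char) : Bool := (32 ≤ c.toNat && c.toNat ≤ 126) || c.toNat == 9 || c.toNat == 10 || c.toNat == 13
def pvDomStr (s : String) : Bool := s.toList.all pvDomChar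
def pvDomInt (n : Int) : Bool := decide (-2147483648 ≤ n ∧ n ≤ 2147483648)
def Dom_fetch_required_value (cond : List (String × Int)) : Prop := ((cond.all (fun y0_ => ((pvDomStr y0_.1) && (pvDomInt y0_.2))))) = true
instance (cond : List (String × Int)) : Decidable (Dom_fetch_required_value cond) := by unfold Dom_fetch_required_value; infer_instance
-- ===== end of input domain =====

-- B merges A's two scans into one pass with a first-loose-match fallback; same result, one traversal.

-- ===== PORT A =====
-- first loop of A: return first int value not in (0,1) whose key starts with "{"
def fetchReqStrict : List (String × Int) → Option Int
  | [] => none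
  | (k, v) :: rest =>
    if (v ≠ 0 ∧ v ≠ 1) ∧ PySem.Str.startswith k "{" then some v else fetchReqStrict rest

-- second loop of A: return first int value whose key starts with "{"
def fetchReqLoose : List (String × Int) → Option Int
  | [] => none
  | (k, v) :: rest =>
    if PySem.Str.startswith k "{" then some v else fetchReqLoose rest

def fetch_required_value (cond : List (String × Int)) : Int :=
  match fetchReqStrict cond with
  | some v => v
  | none =>
    match fetchReqLoose cond with
    | some v => v
    | none => 1

-- ===== PORT B =====
-- single pass: return strict match immediately, remember first loose match as fallback
def fetchReqGo : List (String × Int) → Option Int → Int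
  | [], fallback => fallback.getD 1
  | (k, v) :: rest, fallback =>
    if PySem.Str.startswith k "{" then
      if v ≠ 0 ∧ v ≠ 1 then v
      else fetchReqGo rest (if fallback.isNone then some v else fallback)
    else fetchReqGo rest fallback

def fetch_required_value_alt (cond : List (String × Int)) : Int :=
  fetchReqGo cond none

-- ===== PRECONDITION & SPEC =====
def Spec_fetch_required_value (cond : List (String × Int)) (out : Int) : Prop := out = fetch_required_value_alt cond
instance (cond : List (String × Int)) (out : Int) : Decidable (Spec_fetch_required_value cond out) := by unfold Spec_fetch_required_value; infer_instance

-- ===== CLAIM (what is proved, stated in full; the proofs are below) =====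
def Claim_equal_fetch_required_value : Prop := ∀ (cond : List (String × Int)), Dom_fetch_required_value cond → Spec_fetch_required_value cond (fetch_required_value cond)

-- ===== LEMMAS AND PROOFS =====
-- loop invariant: B's single pass equals "strict match, else fallback, else loose match, else 1"
theorem fetchReqGo_eq (cond : List (String × Int)) :
    ∀ fallback : Option Int,
      fetchReqGo cond fallback =
        match fetchReqStrict cond with
        | some v => v
        | none =>
          match fallback with
          | some f => f
          | none =>
            match fetchReqLoose cond with
            | some v => v
            | none => 1 := by
  induction cond with
  | nil => intro fallback; cases fallback <;> simp [fetchReqGo, fetchReqStrict, fetchReqLoose]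
  | cons kv rest ih =>
    intro fallback
    obtain ⟨k, v⟩ := kv
    simp only [fetchReqGo, fetchReqStrict, fetchReqLoose]
    split_ifs with h1 h2 h3 h4 <;>
      first
        | rfl
        | tauto
        | (rw [ih]; cases fallback <;> simp_all)

-- ===== VERDICT (by name: the statement is the Claim_ definition above) =====
theorem fetch_required_value_spec : Claim_equal_fetch_required_value := by
  intro cond _
  unfold Spec_fetch_required_value fetch_required_value fetch_required_value_alt
  rw [fetchReqGo_eq]
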